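-- pv_equiv track=rewrite | github.com/chenganggang2020/BasePlaneFittingTerrain | reproduce_paper_figures.py | resolve_metric_name
-- ===== SOURCE A (Python) =====
-- def resolve_metric_name(rows, aliases):
--     available = set()
--     for row in rows:
--         available.update(row.keys())
--     for alias in aliases:
--         if alias in available:
--             return alias
--     return None
-- ===== SOURCE B (Python) =====
-- def resolve_metric_name(rows, aliases):
--     # Rank each alias by its first position, then take the minimum rank
--     # over all keys appearing in any row; return the alias at that rank.
--     rank = {}
--     for i, alias in enumerate(aliases):
--         if alias not in rank:
--             rank[alias] = i
--     best = None
--     for row in rows: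
--         for key in row:
--             r = rank.get(key)
--             if r is not None and (best is None or r < best):
--                 best = r
--     return aliases[best] if best is not None else None
-- ===== Notes on version B (the rewrite author's own statement) =====
-- stated objective: alternative
-- what changed: Inverts the traversal: instead of building the union of keys and scanning aliases for the first member, B indexes aliases by first-occurrence rank and makes a single pass over all row keys keeping the minimum rank, returning the alias at that rank.
import Mathlib
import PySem

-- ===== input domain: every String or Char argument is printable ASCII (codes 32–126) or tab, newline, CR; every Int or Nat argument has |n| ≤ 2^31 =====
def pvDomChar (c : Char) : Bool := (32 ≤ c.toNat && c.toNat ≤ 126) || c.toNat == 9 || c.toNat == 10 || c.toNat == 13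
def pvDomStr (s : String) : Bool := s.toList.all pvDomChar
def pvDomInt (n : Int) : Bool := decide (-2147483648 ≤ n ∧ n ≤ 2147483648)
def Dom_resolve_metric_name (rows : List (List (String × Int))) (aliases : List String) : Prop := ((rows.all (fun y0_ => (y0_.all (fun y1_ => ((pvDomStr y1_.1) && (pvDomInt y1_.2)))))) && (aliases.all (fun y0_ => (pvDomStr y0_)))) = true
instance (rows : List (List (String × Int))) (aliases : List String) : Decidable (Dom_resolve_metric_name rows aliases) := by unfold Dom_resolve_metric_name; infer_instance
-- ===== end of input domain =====

-- B replaces A's "union all keys, then scan aliases" with "rank aliases by first position,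
-- then take the minimum rank over all row keys" (alternative algorithm; return value only).

-- ===== PORT A =====
-- 'for alias in aliases: if alias in available: return alias' as structural recursion over aliases
def resolveA_loop (available : PySem.Set String) : List String → Option String
  | [] => none
  | a :: rest => if PySem.Set.contains available a then some a else resolveA_loop available rest

def resolve_metric_name (rows : List (List (String × Int))) (aliases : List String) : Option String :=
  -- available = set(); for row in rows: available.update(row.keys())
  let available : PySem.Set String :=
    rows.foldl (fun s row => PySem.Set.update s (PySem.Dict.keys (PySem.Dict.mk row))) PySem.Set.empty
  resolveA_loop available aliases

-- ===== PORT B =====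
-- 'for i, alias in enumerate(aliases): if alias not in rank: rank[alias] = i'
def buildRank : PySem.Dict String Int → List (Int × String) → PySem.Dict String Int
  | d, [] => d
  | d, (i, a) :: rest => buildRank (if d.contains a then d else d.insert a i) rest

-- body of the inner loop: 'r = rank.get(key); if r is not None and (best is None or r < best): best = r'
def bestStep (rank : PySem.Dict String Int) (best : Option Int) (key : String) : Option Int :=
  match rank.get? key, best with
  | some r, none => some r
  | some r, some m => if r < m then some r else some m
  | none, b => b

def resolve_metric_name_alt (rows : List (List (String × Int))) (aliases : List String) : Option String :=
  let rank := buildRank PySem.Dict.empty (PySem.List.enumerate aliases)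
  -- for row in rows: for key in row: …
  let best := rows.foldl (fun b row => (PySem.Dict.keys (PySem.Dict.mk row)).foldl (bestStep rank) b) none
  -- aliases[best] if best is not None else None  (pyGet? never none here: best is a valid index)
  match best with
  | none => none
  | some r => PySem.List.pyGet? aliases r

-- ===== PRECONDITION & SPEC =====
def Spec_resolve_metric_name (rows : List (List (String × Int))) (aliases : List String) (out : Option String) : Prop := out = resolve_metric_name_alt rows aliases
instance (rows : List (List (String × Int))) (aliases : List String) (out : Option String) : Decidable (Spec_resolve_metric_name rows aliases out) := by unfold Spec_resolve_metric_name; infer_instance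

-- ===== CLAIM (what is proved, stated in full; the proofs are below) =====
def Claim_equal_resolve_metric_name : Prop := ∀ (rows : List (List (String × Int))) (aliases : List String), Dom_resolve_metric_name rows aliases → Spec_resolve_metric_name rows aliases (resolve_metric_name rows aliases)

-- ===== LEMMAS AND PROOFS =====

-- the reference predicate: 'alias is a key of some row'
def pvHit (rows : List (List (String × Int))) (a : String) : Bool :=
  rows.any (fun row => PySem.Dict.contains (PySem.Dict.mk row) a)

-- all keys of all rows, in row order
def pvAllKeys (rows : List (List (String × Int))) : List String :=
  rows.flatMap (fun row => PySem.Dict.keys (PySem.Dict.mk row))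

theorem pvHit_iff_mem_allKeys (rows : List (List (String × Int))) (a : String) :
    pvHit rows a = true ↔ a ∈ pvAllKeys rows := by
  simp [pvHit, pvAllKeys, List.any_eq_true, List.mem_flatMap,
        PySem.Dict.contains_iff_mem_keys]

-- ---------- A side: A's result is the first alias hit ----------

theorem mem_available (rows : List (List (String × Int))) (init : PySem.Set String) (a : String) :
    a ∈ rows.foldl (fun s row => PySem.Set.update s (PySem.Dict.keys (PySem.Dict.mk row))) init ↔
      a ∈ init ∨ ∃ row ∈ rows, a ∈ PySem.Dict.keys (PySem.Dict.mk row) := by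
  induction rows generalizing init with
  | nil => simp
  | cons r rs ih =>
    simp only [List.foldl_cons, ih, PySem.Set.mem_update, List.mem_cons]
    constructor
    · rintro (⟨h | h⟩ | ⟨row, hr, hm⟩)
      · exact Or.inl h
      · exact Or.inr ⟨r, Or.inl rfl, h⟩
      · exact Or.inr ⟨row, Or.inr hr, hm⟩
    · rintro (h | ⟨row, (rfl | hr), hm⟩)
      · exact Or.inl (Or.inl h)
      · exact Or.inl (Or.inr hm)
      · exact Or.inr ⟨row, hr, hm⟩

theorem contains_available (rows : List (List (String × Int))) (a : String) :
    PySem.Set.contains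
      (rows.foldl (fun s row => PySem.Set.update s (PySem.Dict.keys (PySem.Dict.mk row))) PySem.Set.empty) a
      = pvHit rows a := by
  rcases h : pvHit rows a with _ | _
  · rcases hc : PySem.Set.contains _ a with _ | _
    · rfl
    · exfalso
      have := (PySem.Set.contains_iff _ _).mp hc
      rw [mem_available] at this
      rcases this with h0 | ⟨row, hr, hm⟩
      · simp [PySem.Set.empty] at h0
      · have hh : pvHit rows a = true := by
          rw [pvHit_iff_mem_allKeys, pvAllKeys, List.mem_flatMap]
          exact ⟨row, hr, hm⟩
        rw [h] at hh
        exact Bool.false_ne_true hh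
  · apply (PySem.Set.contains_iff _ _).mpr
    rw [mem_available]
    rw [pvHit_iff_mem_allKeys, pvAllKeys, List.mem_flatMap] at h
    exact Or.inr h

theorem resolveA_eq_find (rows : List (List (String × Int))) (aliases : List String) :
    resolve_metric_name rows aliases = aliases.find? (pvHit rows) := by
  show resolveA_loop _ aliases = _
  induction aliases with
  | nil => rfl
  | cons a rest ih =>
    rw [List.find?_cons]
    simp only [resolveA_loop, contains_available, ih]
    rcases pvHit rows a with _ | _ <;> simp

-- ---------- B side: rank lookup = first index of the alias ----------

theorem get?_buildRank (l : List (Int × String)) (d : PySem.Dict String Int) (x : String) :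
    (buildRank d l).get? x
      = (d.get? x).or ((l.find? (fun p => p.2 == x)).map (·.1)) := by
  induction l generalizing d with
  | nil => simp [buildRank]
  | cons p rest ih =>
    obtain ⟨i, a⟩ := p
    rw [buildRank, ih]
    by_cases hc : d.contains a = true
    · simp only [hc, if_true]
      by_cases hax : a = x
      · subst hax
        have : (d.get? a).isSome := by rw [← PySem.Dict.contains_eq_isSome_get?]; exact hc
        rcases hv : d.get? a with _ | v
        · simp [hv] at this
        · simp [List.find?_cons, hv]
      · simp [List.find?_cons, beq_iff_eq, hax]
    · simp only [Bool.not_eq_true] at hc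
      simp only [hc, Bool.false_eq_true, if_false]
      by_cases hax : a = x
      · subst hax
        have hnone : d.get? a = none := (PySem.Dict.get?_eq_none_iff_contains d a).mpr hc
        simp [List.find?_cons, PySem.Dict.get?_insert_self, hnone]
      · rw [PySem.Dict.get?_insert_of_ne d i (fun h => hax h.symm)]
        simp [List.find?_cons, beq_iff_eq, hax]

theorem find?_enumerate (aliases : List String) (s : Int) (x : String) :
    ((PySem.List.enumerate aliases s).find? (fun p => p.2 == x)).map (·.1)
      = (aliases.findIdx? (fun y => y == x)).map (fun n => s + (n : Int)) := by
  induction aliases generalizing s with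
  | nil => simp [PySem.List.enumerate_nil]
  | cons a rest ih =>
    by_cases hax : a = x
    · simp [PySem.List.enumerate_cons, List.find?_cons, List.findIdx?_cons, hax]
    · have h2 : ((((s, a) : Int × String)).2 == x) = false := by simpa [beq_iff_eq] using hax
      have h3 : ((a == x) : Bool) = false := by simpa [beq_iff_eq] using hax
      simp only [PySem.List.enumerate_cons, List.find?_cons, List.findIdx?_cons, h2, h3,
        Bool.false_eq_true, if_false]
      rw [ih (s + 1)]
      rcases hfi : rest.findIdx? (fun y => y == x) with _ | n
      · simp
      · show some (s + 1 + (n : Int)) = some (s + ((n + 1 : Nat) : Int))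
        congr 1
        push_cast
        ring

theorem rank_get (aliases : List String) (x : String) :
    (buildRank PySem.Dict.empty (PySem.List.enumerate aliases)).get? x
      = (aliases.findIdx? (fun y => y == x)).map (fun n => (n : Int)) := by
  rw [get?_buildRank]
  simp only [PySem.Dict.get?_empty, Option.none_or]
  have := find?_enumerate aliases 0 x
  simpa using this

-- ---------- B side: the fold computes the minimum of the ranks ----------

theorem foldl_bestStep (rank : PySem.Dict String Int) (ks : List String) (b : Option Int) :
    ks.foldl (bestStep rank) b = (b.toList ++ ks.filterMap rank.get?).min? := by
  induction ks generalizing b with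
  | nil => cases b <;> simp
  | cons k rest ih =>
    rw [List.foldl_cons, ih, List.filterMap_cons]
    rcases hk : rank.get? k with _ | r
    · simp [bestStep, hk]
    · cases b with
      | none => simp [bestStep, hk]
      | some m =>
        have hmin : (if r < m then some r else some m) = some (min m r) := by
          rcases lt_or_ge r m with h | h
          · rw [if_pos h, min_eq_right (le_of_lt h)]
          · rw [if_neg (not_lt.mpr h), min_eq_left h]
        simp only [bestStep, hk, hmin, Option.toList_some, List.singleton_append,
          List.cons_append]
        rcases hm2 : (rest.filterMap rank.get?).min? with _ | v
        · simp [List.min?_cons, hm2]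
        · simp [List.min?_cons, hm2, min_assoc]

-- ---------- the bridge: min rank over present keys = first hit alias ----------

theorem alt_eq_find (rows : List (List (String × Int))) (aliases : List String) :
    resolve_metric_name_alt rows aliases = aliases.find? (pvHit rows) := by
  show (match rows.foldl (fun b row => (PySem.Dict.keys (PySem.Dict.mk row)).foldl (bestStep _) b) none with
        | none => none
        | some r => PySem.List.pyGet? aliases r) = _
  rw [show (rows.foldl (fun b row => (PySem.Dict.keys (PySem.Dict.mk row)).foldl
        (bestStep (buildRank PySem.Dict.empty (PySem.List.enumerate aliases))) b) none)
      = (pvAllKeys rows).foldl (bestStep (buildRank PySem.Dict.empty (PySem.List.enumerate aliases))) none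
    from (List.foldl_flatMap).symm]
  rw [foldl_bestStep]
  simp only [Option.toList_none, List.nil_append]
  set rank := buildRank PySem.Dict.empty (PySem.List.enumerate aliases) with hrank
  rcases hfind : aliases.find? (pvHit rows) with _ | a
  · -- no alias is present: every key's rank lookup is none
    rw [List.find?_eq_none] at hfind
    have : (pvAllKeys rows).filterMap rank.get? = [] := by
      rw [List.filterMap_eq_nil_iff]
      intro k hk
      rw [hrank, rank_get]
      rw [List.findIdx?_eq_none_iff.mpr]
      · rfl
      · intro y hy
        by_cases hyk : y = k
        · subst hyk
          exact absurd ((pvHit_iff_mem_allKeys rows y).mpr hk) (hfind y hy)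
        · simp [beq_iff_eq, hyk]
    rw [this]; rfl
  · -- 'a' is the first alias present, at index i; the min of the ranks is exactly i
    rw [List.find?_eq_some_iff_getElem] at hfind
    obtain ⟨hpa, i, hi, hgeti, hmin⟩ := hfind
    have hmem : ((i : Int)) ∈ (pvAllKeys rows).filterMap rank.get? := by
      rw [List.mem_filterMap]
      refine ⟨a, (pvHit_iff_mem_allKeys rows a).mp hpa, ?_⟩
      rw [hrank, rank_get]
      have : aliases.findIdx? (fun y => y == a) = some i := by
        rw [List.findIdx?_eq_some_iff_getElem]
        refine ⟨hi, by rw [hgeti]; exact beq_self_eq_true a, ?_⟩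
        intro j hji
        have hj : j < aliases.length := lt_trans hji hi
        intro hpj
        -- aliases[j] = a but j < i: then pvHit holds at j, contradicting minimality
        have hja : aliases[j] = a := by simpa using hpj
        have hne := hmin j hji
        rw [hja] at hne
        simp [hpa] at hne
      rw [this]; rfl
    have hlb : ∀ v ∈ (pvAllKeys rows).filterMap rank.get?, (i : Int) ≤ v := by
      intro v hv
      rw [List.mem_filterMap] at hv
      obtain ⟨k, hk, hrk⟩ := hv
      rw [hrank, rank_get] at hrk
      rcases hfi : aliases.findIdx? (fun y => y == k) with _ | n
      · rw [hfi] at hrk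
        cases hrk
      · rw [hfi] at hrk
        have hvn : ((n : Int)) = v := by injection hrk
        rw [List.findIdx?_eq_some_iff_getElem] at hfi
        obtain ⟨hn, hpn, _⟩ := hfi
        have hak : aliases[n] = k := by simpa using hpn
        -- aliases[n] is a key of some row, so pvHit holds at n, hence i ≤ n
        have hhit : pvHit rows (aliases[n]) = true := by
          rw [hak]; exact (pvHit_iff_mem_allKeys rows k).mpr hk
        have hin : i ≤ n := by
          by_contra hlt
          push_neg at hlt
          have := hmin n hlt
          simp [hhit] at this
        rw [← hvn]
        exact_mod_cast hin
    have hmin? : ((pvAllKeys rows).filterMap rank.get?).min? = some ((i : Int)) :=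
      List.min?_eq_some_iff.mpr ⟨hmem, hlb⟩
    rw [hmin?]
    show PySem.List.pyGet? aliases ((i : Nat) : Int) = some a
    rw [PySem.List.pyGet?_natCast]
    simp [List.getElem?_eq_getElem hi, hgeti]

-- ===== VERDICT (by name: the statement is the Claim_ definition above) =====
theorem resolve_metric_name_spec : Claim_equal_resolve_metric_name := by
  intro rows aliases _
  show resolve_metric_name rows aliases = resolve_metric_name_alt rows aliases
  rw [resolveA_eq_find, alt_eq_find]
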